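-- pv_equiv track=rewrite | github.com/vivirodrigues/geneticAlgorithm | puzzle8queens.py | transfMatrix
-- ===== SOURCE A (Python) =====
-- def transfMatrix(vector):
--
-- 	length = len(vector)
-- 	matrix = createMatrix(length,length,0)
--
-- 	for col in range(len(vector)):
-- 		var = vector[col]
--
-- 		for lin in range(len(matrix)):
-- 			list1 = matrix[lin]
--
-- 			if lin == var:
-- 				matrix[lin][col] = 1
--
-- 	return matrix
--
-- def createMatrix(num_lin, num_col, value):
-- 	matrix = []
-- 	for i in range(num_lin):
-- 		line = []
-- 		for j in range(num_col):
-- 			line.append(value)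
-- 		matrix.append(line)
-- 	return matrix
-- ===== SOURCE B (Python) =====
-- def transfMatrix(vector):
--     length = len(vector)
--     matrix = [[0] * length for _ in range(length)]
--     for col, var in enumerate(vector):
--         if 0 <= var < length:
--             matrix[var][col] = 1
--     return matrix
-- ===== Notes on version B (the rewrite author's own statement) =====
-- stated objective: simpler
-- what changed: replaces A's nested column-by-row scan (and its element-by-element matrix construction) with a replicated zero matrix and a single enumerate pass that places each in-range queen by direct index assignment
import Mathlib
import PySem

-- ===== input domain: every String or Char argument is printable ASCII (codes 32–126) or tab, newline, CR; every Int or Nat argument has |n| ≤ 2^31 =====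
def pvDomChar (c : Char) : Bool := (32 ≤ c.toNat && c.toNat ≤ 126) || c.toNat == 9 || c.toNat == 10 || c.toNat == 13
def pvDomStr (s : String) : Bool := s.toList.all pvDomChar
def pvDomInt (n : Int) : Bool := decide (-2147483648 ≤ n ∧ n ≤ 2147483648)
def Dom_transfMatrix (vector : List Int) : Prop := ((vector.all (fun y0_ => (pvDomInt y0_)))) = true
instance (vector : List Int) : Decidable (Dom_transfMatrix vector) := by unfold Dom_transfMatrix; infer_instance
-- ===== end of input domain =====

-- B replaces A's nested column-by-row scan (and append-based matrix construction) with a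
-- replicated zero matrix and a single enumerate pass placing each in-range queen directly (simpler).

-- ===== PORT A =====
def createMatrix (numLin numCol : Nat) (value : Int) : List (List Int) :=
  (List.range numLin).foldl
    (fun matrix _i =>
      matrix ++ [(List.range numCol).foldl (fun line _j => line ++ [value]) []])
    []

def transfMatrix (vector : List Int) : List (List Int) :=
  let length := vector.length
  let matrix := createMatrix length length 0
  (List.range vector.length).foldl
    (fun matrix col =>
      let var := vector.getD col 0
      (List.range matrix.length).foldl
        (fun matrix lin =>
          let _list1 := matrix.getD lin []
          if (lin : Int) = var then matrix.set lin ((matrix.getD lin []).set col 1)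
          else matrix)
        matrix)
    matrix

-- ===== PORT B =====
def transfMatrix_alt (vector : List Int) : List (List Int) :=
  let length := vector.length
  let matrix := List.replicate length (List.replicate length (0 : Int))
  (PySem.List.enumerate vector 0).foldl
    (fun m cv =>
      if 0 ≤ cv.2 ∧ cv.2 < (length : Int) then
        m.set cv.2.toNat ((m.getD cv.2.toNat []).set cv.1.toNat 1)
      else m)
    matrix

-- ===== PRECONDITION & SPEC =====
def Spec_transfMatrix (vector : List Int) (out : List (List Int)) : Prop := out = transfMatrix_alt vector
instance (vector : List Int) (out : List (List Int)) : Decidable (Spec_transfMatrix vector out) := by unfold Spec_transfMatrix; infer_instance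

-- ===== CLAIM (what is proved, stated in full; the proofs are below) =====
def Claim_equal_transfMatrix : Prop := ∀ (vector : List Int), Dom_transfMatrix vector → Spec_transfMatrix vector (transfMatrix vector)

-- ===== LEMMAS AND PROOFS =====

-- append-a-constant loop = replicate
lemma foldl_append_const {α : Type} (l : List Nat) (v : α) :
    ∀ (acc : List α), l.foldl (fun a _ => a ++ [v]) acc = acc ++ List.replicate l.length v := by
  induction l with
  | nil => intro acc; simp
  | cons x xs ih =>
      intro acc
      simp [List.foldl_cons, ih, List.replicate_succ]

lemma createMatrix_eq (n : Nat) :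
    createMatrix n n 0 = List.replicate n (List.replicate n (0 : Int)) := by
  unfold createMatrix
  rw [foldl_append_const]
  simp

-- A's inner row scan places the single matching row, or does nothing
lemma innerA (var : Int) (col : Nat) :
    ∀ (k : Nat) (m : List (List Int)),
      (List.range k).foldl
        (fun (m : List (List Int)) (lin : Nat) => if (lin : Int) = var then m.set lin ((m.getD lin []).set col 1) else m) m
      = if 0 ≤ var ∧ var < (k : Int) then m.set var.toNat ((m.getD var.toNat []).set col 1) else m := by
  intro k
  induction k with
  | zero =>
      intro m
      simp only [List.range_zero, List.foldl_nil]
      rw [if_neg (by omega)]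
  | succ k ih =>
      intro m
      rw [List.range_succ, List.foldl_append, List.foldl_cons, List.foldl_nil, ih]
      by_cases h : (k : Int) = var
      · rw [if_neg (show ¬(0 ≤ var ∧ var < (k : Int)) from by omega), if_pos h,
          if_pos (show 0 ≤ var ∧ var < ((k + 1 : Nat) : Int) from by push_cast; omega)]
        have hk : var.toNat = k := by omega
        rw [hk]
      · rw [if_neg h]
        by_cases h2 : 0 ≤ var ∧ var < (k : Int)
        · rw [if_pos h2,
            if_pos (show 0 ≤ var ∧ var < ((k + 1 : Nat) : Int) from by
              obtain ⟨a, b⟩ := h2; push_cast; omega)]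
        · rw [if_neg h2,
            if_neg (show ¬(0 ≤ var ∧ var < ((k + 1 : Nat) : Int)) from by
              push_cast at h2 ⊢; omega)]

-- the two outer loops agree, given the length invariant
lemma outer (v : List Int) (n : Nat) :
    ∀ (idx : List Nat) (m : List (List Int)), m.length = n →
      idx.foldl
        (fun m col =>
          (List.range m.length).foldl
            (fun (m : List (List Int)) (lin : Nat) =>
              if (lin : Int) = v.getD col 0 then m.set lin ((m.getD lin []).set col 1) else m) m) m
      = idx.foldl
        (fun m col =>
          if 0 ≤ v.getD col 0 ∧ v.getD col 0 < (n : Int) then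
            m.set (v.getD col 0).toNat ((m.getD (v.getD col 0).toNat []).set col 1)
          else m) m := by
  intro idx
  induction idx with
  | nil => intro m _; rfl
  | cons col idx ih =>
      intro m hm
      rw [List.foldl_cons, List.foldl_cons, innerA, hm]
      apply ih
      split_ifs <;> simp [List.length_set, hm]

-- B's enumerate loop rewritten as a loop over List.range
lemma alt_eq_range (v : List Int) :
    transfMatrix_alt v
      = (List.range v.length).foldl
          (fun m col =>
            if 0 ≤ v.getD col 0 ∧ v.getD col 0 < (v.length : Int) then
              m.set (v.getD col 0).toNat ((m.getD (v.getD col 0).toNat []).set col 1)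
            else m)
          (List.replicate v.length (List.replicate v.length (0 : Int))) := by
  unfold transfMatrix_alt
  rw [PySem.List.enumerate_eq_map_pyRange (d := 0), List.foldl_map, PySem.List.pyRange_one,
    List.foldl_map]
  simp [PySem.List.pyGetD_natCast]

-- ===== VERDICT (by name: the statement is the Claim_ definition above) =====
theorem transfMatrix_spec : Claim_equal_transfMatrix := by
  intro v _
  show transfMatrix v = transfMatrix_alt v
  simp only [transfMatrix]
  rw [createMatrix_eq, alt_eq_range]
  exact outer v v.length (List.range v.length)
    (List.replicate v.length (List.replicate v.length 0)) (by simp)
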